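-- pv_equiv track=rewrite | github.com/xyltec/python1-2023 | src/algo/egzaminacyjne/egzamin.py | target_practice
-- ===== SOURCE A (Python) =====
-- def target_practice(map: str):
--
--     smaller_strings = [map[i:i+10] for i in range(0, len(map), 10)]
--
--     x_coordinates = []
--     i = 9
--     for row_number, row in enumerate(smaller_strings):
--         x_indices = [index for index, char in enumerate(row) if char == 'X']
--         if x_indices:
--             x_coordinates.extend([(x, i) for x in x_indices])
--         i -= 1
--
--     one_point = [(0,9),(1,9),(2,9),(3,9),(4,9),(5,9),(6,9),(7,9),(8,9),(9,9),(9,8),(9,7),(9,6),(9,5),(9,4),(9,3),(9,2),(9,1),(9,0),(8,0),(7,0),(6,0),(5,0),(4,0),(3,0),(2,0),(1,0),(0,0),(0,1),(0,2),(0,3),(0,4),(0,5),(0,6),(0,7),(0,8)]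
--     two_points = [(1,8),(2,8),(3,8),(4,8),(5,8),(6,8),(7,8),(8,8),(8,7),(8,6),(8,5),(8,4),(8,3),(8,2),(8,1),(7,1),(6,1),(5,1),(4,1),(3,1),(2,1),(1,1),(1,2),(1,3),(1,4),(1,5),(1,6),(1,7)]
--     three_points = [(2,7),(3,7),(4,7),(5,7),(6,7),(7,7),(7,6),(7,5),(7,4),(7,3),(7,2),(6,2),(5,2),(4,2),(3,2),(2,2),(2,3),(2,4),(2,5),(2,6)]
--     four_points = [(3,6),(4,6),(5,6),(6,6),(6,5),(6,4),(6,3),(5,3),(4,3),(3,3),(3,4),(3,5)]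
--     five_points = [(4,5),(5,5),(4,4),(5,4)]
--     scored_points = 0
--
--     for coordinate in x_coordinates:
--         if coordinate in one_point:
--             scored_points += 1
--         elif coordinate in two_points:
--             scored_points += 2
--         elif coordinate in three_points:
--             scored_points += 3
--         elif coordinate in four_points:
--             scored_points += 4
--         elif coordinate in five_points:
--             scored_points += 5
--
--     return scored_points
-- ===== SOURCE B (Python) =====
-- def target_practice(map: str):
--     rows = [map[i:i+10] for i in range(0, len(map), 10)]
--     total = 0
--     for r, row in enumerate(rows[:10]):
--         for x, c in enumerate(row):
--             if c == 'X':
--                 total += min(x, r, 9 - x, 9 - r) + 1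
--     return total
-- ===== Notes on version B (the rewrite author's own statement) =====
-- stated objective: simpler
-- what changed: Replaces the five hard-coded coordinate lookup tables and the two-phase collect-coordinates-then-score loop with a single pass over the first ten rows that scores each hit by the closed-form ring formula min(x, r, 9-x, 9-r) + 1.
import Mathlib
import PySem

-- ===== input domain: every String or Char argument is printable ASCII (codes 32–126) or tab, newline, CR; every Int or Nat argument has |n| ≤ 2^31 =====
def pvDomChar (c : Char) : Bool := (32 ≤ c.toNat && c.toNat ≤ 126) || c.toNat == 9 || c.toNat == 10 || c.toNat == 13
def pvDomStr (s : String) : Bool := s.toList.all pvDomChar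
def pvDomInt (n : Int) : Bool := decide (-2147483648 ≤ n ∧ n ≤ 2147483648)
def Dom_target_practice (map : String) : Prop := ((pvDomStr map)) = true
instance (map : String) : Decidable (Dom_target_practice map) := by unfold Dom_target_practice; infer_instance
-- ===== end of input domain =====

-- B replaces A's five hard-coded coordinate tables and two-phase collect-then-score loops
-- with a single pass scoring each 'X' by the closed-form ring value min(x, r, 9-x, 9-r) + 1 (simpler).

-- ===== PORT A =====
def pvOnePoint : List (Int × Int) := [(0,9),(1,9),(2,9),(3,9),(4,9),(5,9),(6,9),(7,9),(8,9),(9,9),(9,8),(9,7),(9,6),(9,5),(9,4),(9,3),(9,2),(9,1),(9,0),(8,0),(7,0),(6,0),(5,0),(4,0),(3,0),(2,0),(1,0),(0,0),(0,1),(0,2),(0,3),(0,4),(0,5),(0,6),(0,7),(0,8)]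
def pvTwoPoints : List (Int × Int) := [(1,8),(2,8),(3,8),(4,8),(5,8),(6,8),(7,8),(8,8),(8,7),(8,6),(8,5),(8,4),(8,3),(8,2),(8,1),(7,1),(6,1),(5,1),(4,1),(3,1),(2,1),(1,1),(1,2),(1,3),(1,4),(1,5),(1,6),(1,7)]
def pvThreePoints : List (Int × Int) := [(2,7),(3,7),(4,7),(5,7),(6,7),(7,7),(7,6),(7,5),(7,4),(7,3),(7,2),(6,2),(5,2),(4,2),(3,2),(2,2),(2,3),(2,4),(2,5),(2,6)]
def pvFourPoints : List (Int × Int) := [(3,6),(4,6),(5,6),(6,6),(6,5),(6,4),(6,3),(5,3),(4,3),(3,3),(3,4),(3,5)]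
def pvFivePoints : List (Int × Int) := [(4,5),(5,5),(4,4),(5,4)]

def target_practice (map : String) : Int :=
  let l := map.toList
  let smaller_strings := (PySem.List.pyRange 0 l.length 10).map
    (fun i => PySem.List.slice l (some i) (some (i + 10)))
  -- for row_number, row in enumerate(...): build x_coordinates, decrementing i from 9
  let st := (PySem.List.enumerate smaller_strings).foldl
    (fun (s : List (Int × Int) × Int) rr =>
      let x_indices := ((PySem.List.enumerate rr.2).filter (fun p => p.2 = 'X')).map (fun p => p.1)
      if x_indices ≠ [] then
        (s.1 ++ x_indices.map (fun x => (x, s.2)), s.2 - 1)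
      else (s.1, s.2 - 1))
    ([], 9)
  let x_coordinates := st.1
  x_coordinates.foldl
    (fun scored c =>
      if c ∈ pvOnePoint then scored + 1
      else if c ∈ pvTwoPoints then scored + 2
      else if c ∈ pvThreePoints then scored + 3
      else if c ∈ pvFourPoints then scored + 4
      else if c ∈ pvFivePoints then scored + 5
      else scored)
    0

-- ===== PORT B =====
def target_practice_alt (map : String) : Int :=
  let l := map.toList
  let rows := (PySem.List.pyRange 0 l.length 10).map
    (fun i => PySem.List.slice l (some i) (some (i + 10)))
  (PySem.List.enumerate (PySem.List.slice rows (some 0) (some 10))).foldl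
    (fun total rr =>
      (PySem.List.enumerate rr.2).foldl
        (fun t p =>
          if p.2 = 'X' then t + (min (min p.1 rr.1) (min (9 - p.1) (9 - rr.1)) + 1) else t)
        total)
    0

-- ===== PRECONDITION & SPEC =====
def Spec_target_practice (map : String) (out : Int) : Prop := out = target_practice_alt map
instance (map : String) (out : Int) : Decidable (Spec_target_practice map out) := by unfold Spec_target_practice; infer_instance

-- ===== CLAIM (what is proved, stated in full; the proofs are below) =====
def Claim_equal_target_practice : Prop := ∀ (map : String), Dom_target_practice map → Spec_target_practice map (target_practice map)

-- ===== LEMMAS AND PROOFS =====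

-- A's per-coordinate score (the if-chain of table memberships)
def pvScore (c : Int × Int) : Int :=
  if c ∈ pvOnePoint then 1
  else if c ∈ pvTwoPoints then 2
  else if c ∈ pvThreePoints then 3
  else if c ∈ pvFourPoints then 4
  else if c ∈ pvFivePoints then 5
  else 0

-- B's closed-form score of an X at column x in board row r (counted from the top)
def pvRing (x r : Int) : Int := min (min x r) (min (9 - x) (9 - r)) + 1

-- the coordinate list A accumulates, as a structural recursion
def pvCoords : List (List Char) → Int → List (Int × Int)
  | [], _ => []
  | row :: t, i =>
      ((PySem.List.enumerate row).filter (fun p => p.2 = 'X')).map (fun p => (p.1, i)) ++ pvCoords t (i - 1)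

lemma enumerate_bounds {α : Type} (xs : List α) (s : Int) (p : Int × α) (h : p ∈ PySem.List.enumerate xs s) :
    s ≤ p.1 ∧ p.1 < s + xs.length := by
  induction xs generalizing s with
  | nil => simp [PySem.List.enumerate] at h
  | cons a t ih =>
      rw [PySem.List.enumerate_cons] at h
      rcases List.mem_cons.1 h with h | h
      · subst h; simp
      · have := ih (s + 1) h; simp only [List.length_cons] at this ⊢; push_cast at this ⊢; omega

lemma A_fold_coords (rows : List (List Char)) :
    ∀ (s : Int) (acc : List (Int × Int)) (i : Int),
    (PySem.List.enumerate rows s).foldl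
      (fun (st : List (Int × Int) × Int) rr =>
        let x_indices := ((PySem.List.enumerate rr.2).filter (fun p => p.2 = 'X')).map (fun p => p.1)
        if x_indices ≠ [] then
          (st.1 ++ x_indices.map (fun x => (x, st.2)), st.2 - 1)
        else (st.1, st.2 - 1)) (acc, i)
    = (acc ++ pvCoords rows i, i - rows.length) := by
  induction rows with
  | nil => intro s acc i; simp [PySem.List.enumerate, pvCoords]
  | cons row t ih =>
      intro s acc i
      rw [PySem.List.enumerate_cons, List.foldl_cons]
      by_cases hx : ((PySem.List.enumerate row).filter (fun p => p.2 = 'X')).map (fun p => p.1) = []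
      · have hfilter : (PySem.List.enumerate row).filter (fun p => p.2 = 'X') = [] :=
          List.map_eq_nil_iff.mp hx
        simp only [hx, ne_eq, not_true_eq_false, if_false]
        rw [ih]
        simp only [pvCoords, hfilter, List.map_nil, List.nil_append, Prod.mk.injEq,
          List.length_cons, true_and]
        push_cast
        omega
      · simp only [if_pos hx]
        rw [ih]
        simp only [pvCoords, List.map_map, List.append_assoc, Prod.mk.injEq, List.length_cons]
        push_cast
        constructor
        · rfl
        · omega

lemma score_fold (cs : List (Int × Int)) (a : Int) :
    cs.foldl
      (fun scored c =>
        if c ∈ pvOnePoint then scored + 1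
        else if c ∈ pvTwoPoints then scored + 2
        else if c ∈ pvThreePoints then scored + 3
        else if c ∈ pvFourPoints then scored + 4
        else if c ∈ pvFivePoints then scored + 5
        else scored) a
    = a + (cs.map pvScore).sum := by
  have h : (fun (scored : Int) (c : Int × Int) =>
        if c ∈ pvOnePoint then scored + 1
        else if c ∈ pvTwoPoints then scored + 2
        else if c ∈ pvThreePoints then scored + 3
        else if c ∈ pvFourPoints then scored + 4
        else if c ∈ pvFivePoints then scored + 5
        else scored)
      = (fun scored c => scored + pvScore c) := by
    funext scored c
    unfold pvScore
    split_ifs <;> simp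
  rw [h, PySem.List.foldl_add]

-- score of any coordinate below the board (negative y) is 0
lemma score_neg (x i : Int) (hi : i < 0) : pvScore (x, i) = 0 := by
  unfold pvScore
  rw [if_neg (by simp [pvOnePoint, Prod.ext_iff]; omega),
      if_neg (by simp [pvTwoPoints, Prod.ext_iff]; omega),
      if_neg (by simp [pvThreePoints, Prod.ext_iff]; omega),
      if_neg (by simp [pvFourPoints, Prod.ext_iff]; omega),
      if_neg (by simp [pvFivePoints, Prod.ext_iff]; omega)]

-- closed form equals the table score on the board
lemma score_ring_fin : ∀ (a b : Fin 10), pvScore ((a : Int), 9 - (b : Int)) = pvRing (a : Int) (b : Int) := by decide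

lemma score_ring (x r : Int) (hx0 : 0 ≤ x) (hx : x ≤ 9) (hr0 : 0 ≤ r) (hr : r ≤ 9) :
    pvScore (x, 9 - r) = pvRing x r := by
  have := score_ring_fin ⟨x.toNat, by omega⟩ ⟨r.toNat, by omega⟩
  simpa [Int.toNat_of_nonneg hx0, Int.toNat_of_nonneg hr0] using this

-- B's inner loop is a sum of ring scores over the X positions
lemma B_row (row : List Char) (r t : Int) :
    (PySem.List.enumerate row).foldl
      (fun t p => if p.2 = 'X' then t + (min (min p.1 r) (min (9 - p.1) (9 - r)) + 1) else t) t
    = t + (((PySem.List.enumerate row).filter (fun p => p.2 = 'X')).map (fun p => pvRing p.1 r)).sum := by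
  rw [PySem.List.foldl_ite_eq_foldl_filter, PySem.List.foldl_add]
  simp [pvRing]

-- the outer fold over rows is linear in its initial accumulator
lemma foldl_init_add {α : Type} (f : Int → α → Int) (hf : ∀ a x, f a x = a + f 0 x) :
    ∀ (l : List α) (a : Int), l.foldl f a = a + l.foldl f 0 := by
  intro l
  induction l with
  | nil => intro a; simp
  | cons x l ih =>
      intro a
      rw [List.foldl_cons, List.foldl_cons, ih (f a x), ih (f 0 x), hf a x]
      ring

lemma B_outer_init (rs : List (Int × List Char)) (a : Int) :
    rs.foldl (fun total rr =>
      (PySem.List.enumerate rr.2).foldl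
        (fun t p => if p.2 = 'X' then t + (min (min p.1 rr.1) (min (9 - p.1) (9 - rr.1)) + 1) else t)
        total) a
    = a + rs.foldl (fun total rr =>
      (PySem.List.enumerate rr.2).foldl
        (fun t p => if p.2 = 'X' then t + (min (min p.1 rr.1) (min (9 - p.1) (9 - rr.1)) + 1) else t)
        total) 0 :=
  foldl_init_add _ (fun a rr => by rw [B_row, B_row]; ring) rs a

-- coordinate scores vanish entirely below the board
lemma coords_neg (rows : List (List Char)) : ∀ (i : Int), i < 0 →
    ((pvCoords rows i).map pvScore).sum = 0 := by
  induction rows with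
  | nil => intro i _; simp [pvCoords]
  | cons row t ih =>
      intro i hi
      simp only [pvCoords, List.map_append, List.sum_append, List.map_map]
      rw [ih (i - 1) (by omega)]
      have : ∀ p ∈ (PySem.List.enumerate row).filter (fun p => p.2 = 'X'),
          (pvScore ∘ fun p => (p.1, i)) p = (fun _ => (0 : Int)) p := by
        intro p _; exact score_neg p.1 i hi
      rw [List.map_congr_left this]
      simp

-- the central correspondence: A's total from row counter i = 9 - r equals B's total over the first 10 - r rows
lemma main_eq (rows : List (List Char)) :
    ∀ (r : Int), 0 ≤ r → (∀ row ∈ rows, row.length ≤ 10) →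
    ((pvCoords rows (9 - r)).map pvScore).sum
    = (PySem.List.enumerate (rows.take (10 - r).toNat) r).foldl
        (fun total rr =>
          (PySem.List.enumerate rr.2).foldl
            (fun t p => if p.2 = 'X' then t + (min (min p.1 rr.1) (min (9 - p.1) (9 - rr.1)) + 1) else t)
            total) 0 := by
  induction rows with
  | nil => intro r _ _; simp [pvCoords]
  | cons row t ih =>
      intro r hr0 hlen
      by_cases hr : r ≤ 9
      · have htake : ((10 : Int) - r).toNat = ((10 - (r+1)).toNat) + 1 := by omega
        rw [htake, List.take_succ_cons, PySem.List.enumerate_cons, List.foldl_cons]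
        simp only [pvCoords, List.map_append, List.sum_append, List.map_map]
        have h1 : (List.map (pvScore ∘ fun p => (p.1, 9 - r))
              ((PySem.List.enumerate row).filter (fun p => p.2 = 'X'))).sum
            = (List.map (fun p => pvRing p.1 r)
              ((PySem.List.enumerate row).filter (fun p => p.2 = 'X'))).sum := by
          congr 1
          apply List.map_congr_left
          intro p hp
          have hmem : p ∈ PySem.List.enumerate row := List.mem_of_mem_filter hp
          have hb := enumerate_bounds row 0 p hmem
          have hl := hlen row (by simp)
          simpa using score_ring p.1 r (by omega) (by omega) hr0 hr
        rw [h1, B_row row r 0, B_outer_init]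
        have h2 := ih (r + 1) (by omega) (fun x hx => hlen x (by simp [hx]))
        have h3 : (9 : Int) - r - 1 = 9 - (r + 1) := by ring
        rw [h3, h2]
        ring
      · -- r ≥ 10: B takes no rows, A's counter is negative
        have htake : ((10 : Int) - r).toNat = 0 := by omega
        rw [htake]
        simp only [List.take_zero, PySem.List.enumerate_nil, List.foldl_nil]
        exact coords_neg (row :: t) (9 - r) (by omega)

lemma slice_len_le (l : List Char) (i : Int) (hi : 0 ≤ i) :
    (PySem.List.slice l (some i) (some (i + 10))).length ≤ 10 := by
  rw [PySem.List.slice_toNat l hi (by omega)]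
  simp
  omega

-- ===== VERDICT (by name: the statement is the Claim_ definition above) =====
theorem target_practice_spec : Claim_equal_target_practice := by
  intro map _
  unfold Spec_target_practice target_practice target_practice_alt
  simp only []
  set l := map.toList with hl
  set rows := (PySem.List.pyRange 0 l.length 10).map
    (fun i => PySem.List.slice l (some i) (some (i + 10))) with hrows
  have hlen : ∀ row ∈ rows, row.length ≤ 10 := by
    intro row hrow
    rw [hrows] at hrow
    rcases List.mem_map.1 hrow with ⟨i, hi, rfl⟩
    have hi0 : 0 ≤ i :=
      ((PySem.List.mem_pyRange_iff_of_pos (by norm_num : (0:Int) < 10) i).1 hi).1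
    exact slice_len_le l i hi0
  rw [A_fold_coords rows 0 [] 9, List.nil_append, score_fold]
  have hslice : PySem.List.slice rows (some 0) (some 10) = rows.take 10 := by
    rw [PySem.List.slice_toNat rows (by norm_num : (0:Int) ≤ 0) (by norm_num : (0:Int) ≤ 10)]
    simp
  rw [hslice]
  have hmain := main_eq rows 0 (by norm_num) hlen
  simp only [sub_zero] at hmain
  rw [zero_add]
  exact hmain
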